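-- pv_equiv track=rewrite | github.com/greenelab/manubot | manubot/cite/util.py | infer_citation_prefix
-- ===== SOURCE A (Python) =====
-- citeproc_retrievers = {
--     'doi': 'manubot.cite.doi.get_doi_citeproc',
--     'pmid': 'manubot.cite.pubmed.get_pubmed_citeproc',
--     'pmcid': 'manubot.cite.pubmed.get_pmc_citeproc',
--     'arxiv': 'manubot.cite.arxiv.get_arxiv_citeproc',
--     'isbn': 'manubot.cite.isbn.get_isbn_citeproc',
--     'wikidata': 'manubot.cite.wikidata.get_wikidata_citeproc',
--     'url': 'manubot.cite.url.get_url_citeproc',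
-- }
--
-- def infer_citation_prefix(citation):
--     """
--     Passthrough citation if it has a valid citation prefix. Otherwise,
--     if the lowercase citation prefix is valid, convert the prefix to lowercase.
--     Otherwise, assume citation is raw and prepend "raw:".
--     """
--     prefixes = [f'{x}:' for x in list(citeproc_retrievers) + ['raw']]
--     for prefix in prefixes:
--         if citation.startswith(prefix):
--             return citation
--         if citation.lower().startswith(prefix):
--             return prefix + citation[len(prefix):]
--     return f'raw:{citation}'
-- ===== SOURCE B (Python) =====
-- _PREFIX_NAMES = {'doi', 'pmid', 'pmcid', 'arxiv', 'isbn', 'wikidata', 'url', 'raw'}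
--
-- def infer_citation_prefix(citation):
--     head, sep, rest = citation.partition(':')
--     if not sep:
--         return f'raw:{citation}'
--     low = head.lower()
--     if low in _PREFIX_NAMES:
--         return low + ':' + rest
--     return f'raw:{citation}'
-- ===== Notes on version B (the rewrite author's own statement) =====
-- stated objective: simpler
-- what changed: Replaces the loop over eight prefix strings with two startswith tests each by a single partition on the first ':' plus one set-membership test of the lowercased head.
import Mathlib
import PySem

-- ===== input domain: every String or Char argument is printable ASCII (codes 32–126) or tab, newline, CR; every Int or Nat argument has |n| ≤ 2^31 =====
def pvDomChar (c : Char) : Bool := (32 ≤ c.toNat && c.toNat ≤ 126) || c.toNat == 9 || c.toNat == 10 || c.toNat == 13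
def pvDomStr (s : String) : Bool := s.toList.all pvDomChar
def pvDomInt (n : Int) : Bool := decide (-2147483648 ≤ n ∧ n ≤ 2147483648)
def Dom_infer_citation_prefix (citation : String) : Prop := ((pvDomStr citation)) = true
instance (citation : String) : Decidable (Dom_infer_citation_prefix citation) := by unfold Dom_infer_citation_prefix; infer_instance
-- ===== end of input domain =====

-- B replaces A's loop over eight "prefix:" strings (two startswith tests each) by one
-- partition at the first ':' plus a single set-membership test of the lowercased head (simpler).


-- ===== PORT A =====
-- module constant: only its keys are used by the function
def citeproc_retrievers : PySem.Dict String String :=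
  PySem.Dict.mk
    [("doi", "manubot.cite.doi.get_doi_citeproc"),
     ("pmid", "manubot.cite.pubmed.get_pubmed_citeproc"),
     ("pmcid", "manubot.cite.pubmed.get_pmc_citeproc"),
     ("arxiv", "manubot.cite.arxiv.get_arxiv_citeproc"),
     ("isbn", "manubot.cite.isbn.get_isbn_citeproc"),
     ("wikidata", "manubot.cite.wikidata.get_wikidata_citeproc"),
     ("url", "manubot.cite.url.get_url_citeproc")]

-- the 'for prefix in prefixes' loop of A
def icpGo (citation : String) : List String → String
  | [] => "raw:" ++ citation
  | p :: ps =>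
    if PySem.Str.startswith citation p then citation
    else if PySem.Str.startswith (PySem.Str.lower citation) p then
      p ++ PySem.Str.slice citation (some (PySem.Str.len p)) none
    else icpGo citation ps

def infer_citation_prefix (citation : String) : String :=
  icpGo citation ((citeproc_retrievers.keys ++ ["raw"]).map (fun x => x ++ ":"))

-- ===== PORT B =====
-- hand port of str.partition(':') : (head, found-separator, rest); exact for a 1-char separator
def icpPartition : List Char → List Char × Bool × List Char
  | [] => ([], false, [])
  | c :: t =>
    if c = ':' then ([], true, t)
    else
      let p := icpPartition t
      (c :: p.1, p.2.1, p.2.2)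

def icpNames : PySem.Set String :=
  PySem.Set.ofList ["doi", "pmid", "pmcid", "arxiv", "isbn", "wikidata", "url", "raw"]

def infer_citation_prefix_alt (citation : String) : String :=
  let p := icpPartition citation.toList
  if p.2.1 = false then "raw:" ++ citation
  else
    let low := PySem.Chars.lower p.1
    if icpNames.contains (String.ofList low) then String.ofList low ++ ":" ++ String.ofList p.2.2
    else "raw:" ++ citation

-- ===== PRECONDITION & SPEC =====
def Spec_infer_citation_prefix (citation : String) (out : String) : Prop := out = infer_citation_prefix_alt citation
instance (citation : String) (out : String) : Decidable (Spec_infer_citation_prefix citation out) := by unfold Spec_infer_citation_prefix; infer_instance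

-- ===== CLAIM (what is proved, stated in full; the proofs are below) =====
def Claim_equal_infer_citation_prefix : Prop := ∀ (citation : String), Dom_infer_citation_prefix citation → Spec_infer_citation_prefix citation (infer_citation_prefix citation)

-- ===== LEMMAS AND PROOFS =====

-- the only character that lowercases to ':' is ':' itself
theorem icp_lowerChar_colon (c : Char) : PySem.Chars.lowerChar c = ':' ↔ c = ':' := by
  constructor
  · intro h
    unfold PySem.Chars.lowerChar at h
    split at h
    · exfalso
      rename_i hu
      simp only [PySem.Chars.isupper, Bool.and_eq_true, decide_eq_true_eq] at hu
      have h1 : 65 ≤ c.toNat := Nat.succ_le_of_lt hu.1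
      have h2 : c.toNat ≤ 90 := hu.2
      have hv : (c.toNat + 32).isValidChar := Or.inl (by omega)
      have h3 : (Char.ofNat (c.toNat + 32)).toNat = c.toNat + 32 := by simp [Char.ofNat, hv]
      rw [h] at h3
      have h4 : (':').toNat = 58 := rfl
      omega
    · exact h
  · intro h; subst h; decide

theorem icp_mem_colon_lower (l : List Char) : ':' ∈ PySem.Chars.lower l ↔ ':' ∈ l := by
  simp only [PySem.Chars.lower, List.mem_map]
  constructor
  · rintro ⟨c, hc, h⟩
    rwa [(icp_lowerChar_colon c).mp h] at hc
  · intro h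
    exact ⟨':', h, (icp_lowerChar_colon ':').mpr rfl⟩

theorem icp_lower_split (h r : List Char) :
    PySem.Chars.lower (h ++ ':' :: r) = PySem.Chars.lower h ++ ':' :: PySem.Chars.lower r := by
  simp [PySem.Chars.lower, (by decide : PySem.Chars.lowerChar ':' = ':')]

theorem icp_lower_length (l : List Char) : (PySem.Chars.lower l).length = l.length := by
  simp [PySem.Chars.lower]

-- a "name:" prefix cannot match a colon-free string
theorem icp_sw_false (l p : List Char) (hp : ':' ∈ p) (h : ':' ∉ l) :
    PySem.Chars.startswith l p = false := by
  rw [Bool.eq_false_iff]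
  intro hc
  exact h (((PySem.Chars.startswith_iff l p).mp hc).mem hp)

-- "w:" is a prefix of a string whose first colon sits after head h exactly when w = h
theorem icp_pre_iff (w : List Char) : ∀ (h r : List Char), ':' ∉ w → ':' ∉ h →
    ((w ++ [':']) <+: (h ++ ':' :: r) ↔ w = h) := by
  induction w with
  | nil =>
    intro h r _ hh
    cases h with
    | nil => simp
    | cons c t =>
      simp only [List.nil_append, List.cons_append, List.cons_prefix_cons]
      constructor
      · rintro ⟨hc, -⟩; exact absurd (hc ▸ List.mem_cons_self) hh
      · intro hc; cases hc
  | cons a w' ih =>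
    intro h r hw hh
    cases h with
    | nil =>
      simp only [List.cons_append, List.nil_append, List.cons_prefix_cons]
      constructor
      · rintro ⟨hc, -⟩; exact absurd (hc ▸ List.mem_cons_self) hw
      · intro hc; cases hc
    | cons c t =>
      have hw' : ':' ∉ w' := fun hx => hw (List.mem_cons_of_mem _ hx)
      have hh' : ':' ∉ t := fun hx => hh (List.mem_cons_of_mem _ hx)
      simp only [List.cons_append, List.cons_prefix_cons, ih t r hw' hh']
      constructor
      · rintro ⟨h1, h2⟩; rw [h1, h2]
      · intro hc
        injection hc with h1 h2
        exact ⟨h1, h2⟩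

theorem icp_sw_iff (w h r : List Char) (hw : ':' ∉ w) (hh : ':' ∉ h) :
    (PySem.Chars.startswith (h ++ ':' :: r) (w ++ [':']) = true ↔ w = h) := by
  rw [PySem.Chars.startswith_iff]
  exact icp_pre_iff w h r hw hh

-- partition specs
theorem icpPartition_false : ∀ (l : List Char), (icpPartition l).2.1 = false → ':' ∉ l := by
  intro l
  induction l with
  | nil => intro _ hx; cases hx
  | cons c t ih =>
    intro h hx
    by_cases hc : c = ':'
    · simp [icpPartition, hc] at h
    · simp only [icpPartition, if_neg hc] at h
      rcases List.mem_cons.mp hx with h1 | h1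
      · exact hc h1.symm
      · exact ih h h1

theorem icpPartition_true : ∀ (l : List Char), (icpPartition l).2.1 = true →
    l = (icpPartition l).1 ++ ':' :: (icpPartition l).2.2 ∧ ':' ∉ (icpPartition l).1 := by
  intro l
  induction l with
  | nil => intro h; cases h
  | cons c t ih =>
    intro h
    by_cases hc : c = ':'
    · subst hc; simp [icpPartition]
    · simp only [icpPartition, if_neg hc] at h ⊢
      obtain ⟨h1, h2⟩ := ih h
      refine ⟨by rw [List.cons_append, ← h1], ?_⟩
      intro hx
      rcases List.mem_cons.mp hx with h3 | h3
      · exact hc h3.symm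
      · exact h2 h3

-- A's loop returns raw when the citation has no colon
theorem icpGo_no_colon (citation : String) (h : ':' ∉ citation.toList) :
    ∀ (ps : List String), (∀ p ∈ ps, ':' ∈ p.toList) →
    icpGo citation ps = "raw:" ++ citation := by
  intro ps
  induction ps with
  | nil => intro _; rfl
  | cons p ps ih =>
    intro hp
    have hp1 : ':' ∈ p.toList := hp p List.mem_cons_self
    have hlow : ':' ∉ (PySem.Str.lower citation).toList := by
      rw [PySem.Str.toList_lower]
      exact fun hx => h ((icp_mem_colon_lower _).mp hx)
    unfold icpGo
    rw [PySem.Str.startswith_eq, icp_sw_false _ _ hp1 h,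
      PySem.Str.startswith_eq, icp_sw_false _ _ hp1 hlow]
    simp only [Bool.false_eq_true, if_false]
    exact ih (fun q hq => hp q (List.mem_cons_of_mem _ hq))

-- A's loop when the citation splits as h ++ ':' :: r
theorem icpGo_sep (citation : String) (h r : List Char)
    (hl : citation.toList = h ++ ':' :: r) (hh : ':' ∉ h) :
    ∀ (names : List String),
    (∀ w ∈ names, ':' ∉ w.toList ∧ PySem.Chars.lower w.toList = w.toList) →
    (icpGo citation (names.map (fun x => x ++ ":"))).toList =
      (if (names.map String.toList).contains (PySem.Chars.lower h) then
        PySem.Chars.lower h ++ ':' :: r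
      else ("raw:" ++ citation).toList) := by
  intro names
  induction names with
  | nil => intro _; simp [icpGo]
  | cons w ns ih =>
    intro hn
    have hw0 := hn w List.mem_cons_self
    have hwc : ':' ∉ w.toList := hw0.1
    have hwl : PySem.Chars.lower w.toList = w.toList := hw0.2
    have htl : (w ++ ":").toList = w.toList ++ [':'] := by
      rw [String.toList_append]; rfl
    have hlowtl : (PySem.Str.lower citation).toList =
        PySem.Chars.lower h ++ ':' :: PySem.Chars.lower r := by
      rw [PySem.Str.toList_lower, hl, icp_lower_split]
    have hlh : ':' ∉ PySem.Chars.lower h :=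
      fun hx => hh ((icp_mem_colon_lower h).mp hx)
    unfold icpGo
    simp only [List.map_cons]
    by_cases hw2 : w.toList = PySem.Chars.lower h
    · -- this name matches the lowercased head
      have hcont : (w.toList :: ns.map String.toList).contains (PySem.Chars.lower h) = true := by
        simp [← hw2]
      by_cases hw1 : w.toList = h
      · -- passthrough branch
        have hsw : PySem.Str.startswith citation (w ++ ":") = true := by
          rw [PySem.Str.startswith_eq, hl, htl]
          exact (icp_sw_iff w.toList h r hwc hh).mpr hw1
        simp only [hsw, if_true, List.contains_cons] at *
        simp only [hcont, if_true]
        rw [hl, ← hw2, hw1]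
      · -- lowercase-normalization branch
        have h1 : PySem.Str.startswith citation (w ++ ":") = false := by
          rw [PySem.Str.startswith_eq, hl, htl, Bool.eq_false_iff]
          intro hc
          exact hw1 ((icp_sw_iff w.toList h r hwc hh).mp hc)
        have h2 : PySem.Str.startswith (PySem.Str.lower citation) (w ++ ":") = true := by
          rw [PySem.Str.startswith_eq, hlowtl, htl]
          exact (icp_sw_iff w.toList (PySem.Chars.lower h) (PySem.Chars.lower r) hwc hlh).mpr hw2
        simp only [h1, h2, Bool.false_eq_true, if_false, if_true, hcont]
        have hlen : PySem.Str.len (w ++ ":") = ((w.toList.length + 1 : Nat) : Int) := by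
          rw [PySem.Str.len_eq, htl]; simp
        have hslice : (PySem.Str.slice citation (some (PySem.Str.len (w ++ ":"))) none).toList = r := by
          rw [PySem.Str.toList_slice, hlen, PySem.Chars.slice_eq_listSlice,
            PySem.List.slice_from _ (Int.natCast_nonneg _), hl, Int.toNat_natCast]
          have hlenh : h.length = w.toList.length := by
            rw [hw2, icp_lower_length]
          rw [← hlenh]
          simp [List.drop_append]
        rw [String.toList_append, hslice, htl, hw2]
        simp
    · -- this name does not match: both tests fail, recurse
      have hw1 : w.toList ≠ h := by
        intro hc
        apply hw2
        rw [hc]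
        have h5 := hwl
        rw [hc] at h5
        exact h5.symm
      have h1 : PySem.Str.startswith citation (w ++ ":") = false := by
        rw [PySem.Str.startswith_eq, hl, htl, Bool.eq_false_iff]
        intro hc
        exact hw1 ((icp_sw_iff w.toList h r hwc hh).mp hc)
      have h2 : PySem.Str.startswith (PySem.Str.lower citation) (w ++ ":") = false := by
        rw [PySem.Str.startswith_eq, hlowtl, htl, Bool.eq_false_iff]
        intro hc
        exact hw2 ((icp_sw_iff w.toList (PySem.Chars.lower h) (PySem.Chars.lower r) hwc hlh).mp hc)
      have hbeq : (PySem.Chars.lower h == w.toList) = false :=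
        beq_eq_false_iff_ne.mpr (fun he => hw2 he.symm)
      simp only [h1, h2, Bool.false_eq_true, if_false, List.contains_cons, hbeq,
        Bool.false_or]
      exact ih (fun q hq => hn q (List.mem_cons_of_mem _ hq))

-- membership in the String set equals membership in the list of char-lists
theorem icp_contains_bridge (low : List Char) :
    icpNames.contains (String.ofList low) =
      ((["doi", "pmid", "pmcid", "arxiv", "isbn", "wikidata", "url", "raw"].map String.toList).contains low) := by
  have hset : icpNames = ["doi", "pmid", "pmcid", "arxiv", "isbn", "wikidata", "url", "raw"] := by
    decide
  have hbeq : ∀ (s : String), (String.ofList low == s) = (low == s.toList) := by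
    intro s
    by_cases hc : low = s.toList
    · subst hc; simp
    · rw [beq_eq_false_iff_ne.mpr hc, beq_eq_false_iff_ne.mpr]
      intro he
      exact hc (by rw [← he, String.toList_ofList])
  show List.contains icpNames (String.ofList low) = _
  rw [hset]
  simp only [List.map_cons, List.map_nil, List.contains_cons, List.contains_nil, hbeq]

-- ===== VERDICT (by name: the statement is the Claim_ definition above) =====
theorem infer_citation_prefix_spec : Claim_equal_infer_citation_prefix := by
  intro citation _
  unfold Spec_infer_citation_prefix infer_citation_prefix infer_citation_prefix_alt
  have hnames : (citeproc_retrievers.keys ++ ["raw"]) =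
      ["doi", "pmid", "pmcid", "arxiv", "isbn", "wikidata", "url", "raw"] := by decide
  rw [hnames]
  cases hp : (icpPartition citation.toList).2.1 with
  | false =>
    have hnc : ':' ∉ citation.toList := icpPartition_false _ hp
    simp only [hp]
    exact icpGo_no_colon citation hnc _ (by decide)
  | true =>
    obtain ⟨hl, hh⟩ := icpPartition_true citation.toList hp
    have hA := icpGo_sep citation _ _ hl hh
      ["doi", "pmid", "pmcid", "arxiv", "isbn", "wikidata", "url", "raw"] (by decide)
    simp only [hp, Bool.true_eq_false, if_false]
    apply String.toList_inj.mp
    rw [hA, icp_contains_bridge]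
    by_cases hc : ((["doi", "pmid", "pmcid", "arxiv", "isbn", "wikidata", "url", "raw"].map
        String.toList).contains (PySem.Chars.lower (icpPartition citation.toList).1)) = true
    · rw [if_pos hc, if_pos hc]
      simp [String.toList_append]
    · rw [if_neg hc, if_neg hc]
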